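-- pv_equiv track=rewrite | github.com/hainamnguyen/data-structure-and-algorithm-coursera-ucsd | Coding/String/Week 2/bwtinverse/debug.py | enumerate_word
-- ===== SOURCE A (Python) =====
-- def enumerate_word(word):
--     '''
--     Enumerates like characters in the order of their appearance for the given word.
--     i.e. 'abcbba' returns ['a0', 'b0', 'c0', 'b1', 'b2', 'a1']
--     '''
--
--     # Initialize the character count and enumerated character list.
--     char_count = {}
--     enumerated = []
--
--     # Enumerate like characters.
--     for ch in word:
--         if ch not in char_count:
--             char_count[ch] = 0
--         else:
--             char_count[ch] += 1
--         enumerated.append(ch+str(char_count[ch]))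
--
--     return enumerated
-- ===== SOURCE B (Python) =====
-- def enumerate_word(word):
--     '''
--     Enumerates like characters in the order of their appearance for the given word.
--     i.e. 'abcbba' returns ['a0', 'b0', 'c0', 'b1', 'b2', 'a1']
--     '''
--     # Group-by-character then scatter: for each distinct character, walk the
--     # word numbering its occurrences 0,1,2,... and write each label into a
--     # pre-sized result list at the occurrence's position.
--     result = [''] * len(word)
--     for ch in dict.fromkeys(word):
--         k = 0
--         for i, c in enumerate(word):
--             if c == ch:
--                 result[i] = ch + str(k)
--                 k += 1
--     return result
-- ===== Notes on version B (the rewrite author's own statement) =====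
-- stated objective: alternative
-- what changed: Replaces A's single stateful pass with an incrementally updated per-character counter dict by a group-and-scatter scheme: for each distinct character (dict.fromkeys order) number its occurrences 0,1,2,... in one scan and write each label into a pre-sized result list at the occurrence's position; no counter dict, order-independent scatter writes.
import Mathlib
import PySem

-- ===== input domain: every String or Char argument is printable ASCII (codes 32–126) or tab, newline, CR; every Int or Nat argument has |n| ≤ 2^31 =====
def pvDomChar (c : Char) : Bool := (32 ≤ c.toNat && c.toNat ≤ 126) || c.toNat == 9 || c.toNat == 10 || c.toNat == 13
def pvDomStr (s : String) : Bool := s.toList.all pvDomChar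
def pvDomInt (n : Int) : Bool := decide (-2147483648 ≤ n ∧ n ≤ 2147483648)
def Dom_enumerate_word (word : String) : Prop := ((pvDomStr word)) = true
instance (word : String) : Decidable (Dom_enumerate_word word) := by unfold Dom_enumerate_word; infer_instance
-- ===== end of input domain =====

-- B replaces A's stateful counter-dict pass by group-and-scatter: per distinct character, number
-- its occurrences in one scan and write labels into a pre-sized result list; objective: alternative.

-- ===== PORT A =====
-- one loop iteration: update char_count for ch, then append ch+str(char_count[ch])
-- (char_count[ch] is read as getD ch 0; the key is always present at that point)
def pvStepA (st : PySem.Dict Char Int × List String) (ch : Char) :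
    PySem.Dict Char Int × List String :=
  let cc := if st.1.contains ch = false then st.1.insert ch 0
            else st.1.modify ch 0 (· + 1)
  (cc, st.2 ++ [String.ofList [ch] ++ PySem.Int.toStr (cc.getD ch 0)])

def enumerate_word (word : String) : List String :=
  (word.toList.foldl pvStepA (PySem.Dict.empty, [])).2

-- ===== PORT B =====
-- inner-loop iteration for a fixed distinct character ch, state (result, k):
-- 'if c == ch: result[i] = ch + str(k); k += 1'
def pvStepB (ch : Char) (st : List String × Int) (p : Int × Char) : List String × Int :=
  if p.2 = ch then
    (PySem.List.pySetD st.1 p.1 (String.ofList [ch] ++ PySem.Int.toStr st.2), st.2 + 1)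
  else st

-- result = ['']*len(word); for ch in dict.fromkeys(word): k = 0; for i, c in enumerate(word): …
def enumerate_word_alt (word : String) : List String :=
  let chars := word.toList
  (PySem.List.dedup chars).foldl
    (fun result ch => ((PySem.List.enumerate chars 0).foldl (pvStepB ch) (result, 0)).1)
    (List.replicate chars.length "")

-- ===== PRECONDITION & SPEC =====
def Spec_enumerate_word (word : String) (out : List String) : Prop := out = enumerate_word_alt word
instance (word : String) (out : List String) : Decidable (Spec_enumerate_word word out) := by unfold Spec_enumerate_word; infer_instance

-- ===== CLAIM (what is proved, stated in full; the proofs are below) =====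
def Claim_equal_enumerate_word : Prop := ∀ (word : String), Dom_enumerate_word word → Spec_enumerate_word word (enumerate_word word)

-- ===== LEMMAS AND PROOFS =====

-- the common normal form: labels of `rest` when `pre` has already been read
def pvGold (pre rest : List Char) : List String :=
  match rest with
  | [] => []
  | c :: rs => (String.ofList [c] ++ PySem.Int.toStr (pre.count c)) :: pvGold (pre ++ [c]) rs

-- A's dict invariant after reading `pre`
def pvInv (d : PySem.Dict Char Int) (pre : List Char) : Prop :=
  ∀ c, d.contains c = decide (pre.count c ≠ 0) ∧
       d.getD c 0 = if pre.count c = 0 then 0 else (pre.count c : Int) - 1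

theorem pvInv_empty : pvInv PySem.Dict.empty [] := by
  intro c; simp [PySem.Dict.contains_empty, PySem.Dict.getD_empty]

theorem pvA_gold (rest : List Char) :
    ∀ (pre : List Char) (d : PySem.Dict Char Int) (acc : List String),
      pvInv d pre → (rest.foldl pvStepA (d, acc)).2 = acc ++ pvGold pre rest := by
  induction rest with
  | nil => intro pre d acc _; simp [pvGold]
  | cons c rs ih =>
    intro pre d acc hinv
    obtain ⟨hc, hg⟩ := hinv c
    by_cases h0 : pre.count c = 0
    · have hcon : d.contains c = false := by simp [hc, h0]
      have hstep : pvStepA (d, acc) c =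
          (d.insert c 0, acc ++ [String.ofList [c] ++ PySem.Int.toStr ((pre.count c : Int))]) := by
        simp [pvStepA, hcon, PySem.Dict.getD_insert_self, h0]
      have hinv' : pvInv (d.insert c 0) (pre ++ [c]) := by
        intro c'
        obtain ⟨hc', hg'⟩ := hinv c'
        by_cases hcc : c' = c
        · subst hcc
          constructor
          · simp [List.count_append, h0]
          · simp [PySem.Dict.getD_insert_self, List.count_append, h0]
        · have hcc2 : ¬ c = c' := fun h => hcc h.symm
          constructor
          · simp [PySem.Dict.contains_insert, hcc, hc', List.count_append, hcc2]
          · rw [PySem.Dict.getD_insert]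
            simp [hcc, hcc2, hg', List.count_append]
      simp only [List.foldl_cons, hstep]
      rw [ih (pre ++ [c]) _ _ hinv']
      simp [pvGold]
    · have hcon : d.contains c = true := by simp [hc, h0]
      have hval : (d.modify c 0 (· + 1)).getD c 0 = (pre.count c : Int) := by
        rw [PySem.Dict.getD_modify_self, hg]
        simp [h0]
      have hstep : pvStepA (d, acc) c =
          (d.modify c 0 (· + 1), acc ++ [String.ofList [c] ++ PySem.Int.toStr ((pre.count c : Int))]) := by
        simp [pvStepA, hcon, hval]
      have hinv' : pvInv (d.modify c 0 (· + 1)) (pre ++ [c]) := by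
        intro c'
        obtain ⟨hc', hg'⟩ := hinv c'
        by_cases hcc : c' = c
        · subst hcc
          constructor
          · simp [PySem.Dict.contains_modify, List.count_append, h0]
          · rw [PySem.Dict.getD_modify_self, hg]
            simp only [h0, if_false, List.count_append, List.count_singleton]
            simp
        · have hcc2 : ¬ c = c' := fun h => hcc h.symm
          constructor
          · simp [PySem.Dict.contains_modify, hcc, hc', List.count_append, hcc2]
          · rw [PySem.Dict.getD_modify]
            simp [hcc, hcc2, hg', List.count_append]
      simp only [List.foldl_cons, hstep]
      rw [ih (pre ++ [c]) _ _ hinv']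
      simp [pvGold]

-- the character at position j (a named def so proofs can treat it atomically)
def pvAt (full : List Char) (j : Nat) : Char := full.getD j ' '

-- the label of position j in `full`
def pvTgt (full : List Char) (j : Nat) : String :=
  String.ofList [pvAt full j] ++
    PySem.Int.toStr (((full.take j).count (pvAt full j) : Int))

theorem pvGold_length (rest : List Char) : ∀ pre, (pvGold pre rest).length = rest.length := by
  induction rest with
  | nil => intro pre; simp [pvGold]
  | cons c rs ih => intro pre; simp [pvGold, ih (pre ++ [c])]

theorem pvGold_getD (rest : List Char) :
    ∀ (pre : List Char) (j : Nat), j < rest.length →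
      (pvGold pre rest).getD j "" =
        String.ofList [rest.getD j ' '] ++
          PySem.Int.toStr (((pre ++ rest.take j).count (rest.getD j ' ') : Int)) := by
  induction rest with
  | nil => intro pre j h; simp at h
  | cons c rs ih =>
    intro pre j h
    match j with
    | 0 => simp [pvGold]
    | Nat.succ k =>
      have hk : k < rs.length := by simpa using h
      simp only [pvGold, List.getD_cons_succ, List.take_succ_cons, ih (pre ++ [c]) k hk,
        List.append_assoc, List.cons_append, List.nil_append]

-- a list of the right length, reconstructed as a map over range
theorem pvMapGetD (res : List String) (n : Nat) (h : res.length = n) :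
    (List.range n).map (fun j => res.getD j "") = res := by
  subst h
  apply List.ext_getElem
  · simp
  · intro j h1 h2
    simp only [List.getElem_map, List.getElem_range]
    exact List.getD_eq_getElem res "" h2

-- the inner scan for character ch, started after prefix `pre`, scatters ch's labels
theorem pvInner (full : List Char) (ch : Char) (rest : List Char) :
    ∀ (pre : List Char) (res : List String),
      pre ++ rest = full → res.length = full.length →
      ((PySem.List.enumerate rest (pre.length : Int)).foldl (pvStepB ch)
          (res, (pre.count ch : Int))).1
        = (List.range full.length).map (fun j =>
            if pre.length ≤ j ∧ pvAt full j = ch then pvTgt full j else res.getD j "") := by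
  induction rest with
  | nil =>
    intro pre res hfull hlen
    have hpre : pre.length = full.length := by rw [← hfull]; simp
    rw [PySem.List.enumerate_nil, List.foldl_nil]
    have hcongr : ∀ j ∈ List.range full.length,
        (if pre.length ≤ j ∧ pvAt full j = ch then pvTgt full j else res.getD j "")
          = res.getD j "" := by
      intro j hj
      rw [List.mem_range] at hj
      have : ¬ pre.length ≤ j := by omega
      simp [this]
    rw [List.map_congr_left hcongr, pvMapGetD res full.length hlen]
  | cons c rs ih =>
    intro pre res hfull hlen
    have hm : pre.length < full.length := by rw [← hfull]; simp
    have hplen : (pre ++ [c]).length = pre.length + 1 := by simp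
    have hfm : pvAt full pre.length = c := by
      unfold pvAt
      rw [← hfull, List.getD_eq_getElem _ _ (by simp)]
      simp
    have htake : full.take pre.length = pre := by rw [← hfull]; exact List.take_left
    rw [PySem.List.enumerate_cons, List.foldl_cons]
    by_cases hc : c = ch
    · subst hc
      have hstep : pvStepB c (res, (pre.count c : Int)) ((pre.length : Int), c) =
          (res.set pre.length (String.ofList [c] ++ PySem.Int.toStr ((pre.count c : Int))),
           (pre.count c : Int) + 1) := by
        simp [pvStepB]
      rw [hstep]
      have hnext : (pre.length : Int) + 1 = ((pre ++ [c]).length : Int) := by simp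
      have hcnt : ((pre.count c : Int) + 1) = (((pre ++ [c]).count c : Int)) := by
        simp [List.count_append]
      rw [hnext, hcnt,
        ih (pre ++ [c]) _ (by simpa using hfull) (by simpa using hlen)]
      apply List.map_congr_left
      intro j hj
      rw [List.mem_range] at hj
      have hsl : (res.set pre.length
          (String.ofList [c] ++ PySem.Int.toStr ((pre.count c : Int)))).length = full.length := by
        simp [hlen]
      rcases lt_trichotomy j pre.length with hlt | heq | hgt
      · have h1 : ¬ (pre ++ [c]).length ≤ j := by rw [hplen]; omega
        have h2 : ¬ pre.length ≤ j := by omega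
        simp only [h1, false_and, if_false, h2]
        rw [List.getD_eq_getElem _ _ (by omega : j < res.length),
          List.getD_eq_getElem _ _ (by rw [hsl]; omega),
          List.getElem_set_ne (by omega)]
      · subst heq
        have h1 : ¬ (pre ++ [c]).length ≤ pre.length := by rw [hplen]; omega
        simp only [h1, false_and, if_false, le_refl, hfm, and_self, if_true]
        rw [List.getD_eq_getElem _ _ (by rw [hsl]; omega)]
        rw [List.getElem_set_self (by rw [hsl]; omega)]
        simp [pvTgt, hfm, htake]
      · have h1 : ((pre ++ [c]).length ≤ j) ↔ (pre.length ≤ j) := by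
          rw [hplen]; omega
        simp only [h1]
        by_cases h2 : pre.length ≤ j ∧ pvAt full j = c
        · simp [h2]
        · simp only [h2, if_false]
          rw [List.getD_eq_getElem _ _ (by rw [hsl]; omega),
            List.getD_eq_getElem _ _ (by omega : j < res.length),
            List.getElem_set_ne (by omega)]
    · have hstep : pvStepB ch (res, (pre.count ch : Int)) ((pre.length : Int), c) =
          (res, (pre.count ch : Int)) := by
        simp [pvStepB, hc]
      rw [hstep]
      have hnext : (pre.length : Int) + 1 = ((pre ++ [c]).length : Int) := by simp
      have hcnt : ((pre.count ch : Int)) = (((pre ++ [c]).count ch : Int)) := by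
        simp [List.count_append, hc]
      rw [hnext, hcnt,
        ih (pre ++ [c]) _ (by simpa using hfull) hlen]
      apply List.map_congr_left
      intro j hj
      rw [List.mem_range] at hj
      rcases lt_trichotomy j pre.length with hlt | heq | hgt
      · have h1 : ¬ (pre ++ [c]).length ≤ j := by rw [hplen]; omega
        have h2 : ¬ pre.length ≤ j := by omega
        rw [if_neg (fun h => h1 h.1), if_neg (fun h => h2 h.1)]
      · subst heq
        have h1 : ¬ (pre ++ [c]).length ≤ pre.length := by rw [hplen]; omega
        have h2 : ¬ pvAt full pre.length = ch := by rw [hfm]; exact hc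
        rw [if_neg (fun h => h1 h.1), if_neg (fun h => h2 h.2)]
      · have h1 : ((pre ++ [c]).length ≤ j) ↔ (pre.length ≤ j) := by
          rw [hplen]; omega
        simp only [h1]

-- the inner scan started from the beginning of the word
theorem pvInner0 (full : List Char) (ch : Char) (res : List String)
    (hlen : res.length = full.length) :
    ((PySem.List.enumerate full 0).foldl (pvStepB ch) (res, 0)).1
      = (List.range full.length).map (fun j =>
          if pvAt full j = ch then pvTgt full j else res.getD j "") := by
  have hin := pvInner full ch full [] res (by simp) hlen
  simp only [List.length_nil, List.count_nil, Nat.cast_zero] at hin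
  rw [hin]
  apply List.map_congr_left
  intro j hj
  simp

-- the outer loop over distinct characters: set membership accumulates
theorem pvOuter (full : List Char) (todo : List Char) :
    ∀ (S : List Char),
      todo.foldl (fun result ch => ((PySem.List.enumerate full 0).foldl (pvStepB ch) (result, 0)).1)
          ((List.range full.length).map (fun j =>
            if pvAt full j ∈ S then pvTgt full j else ""))
        = (List.range full.length).map (fun j =>
            if pvAt full j ∈ S ++ todo then pvTgt full j else "") := by
  induction todo with
  | nil => intro S; simp
  | cons ch cs ih =>
    intro S
    rw [List.foldl_cons]
    have hres :
        ((PySem.List.enumerate full 0).foldl (pvStepB ch)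
            ((List.range full.length).map (fun j =>
              if pvAt full j ∈ S then pvTgt full j else ""), 0)).1
          = (List.range full.length).map (fun j =>
              if pvAt full j ∈ S ++ [ch] then pvTgt full j else "") := by
      rw [pvInner0 full ch _ (by simp)]
      apply List.map_congr_left
      intro j hj
      rw [List.mem_range] at hj
      have hg : ((List.range full.length).map (fun j =>
          if pvAt full j ∈ S then pvTgt full j else "")).getD j ""
            = (if pvAt full j ∈ S then pvTgt full j else "") := by
        rw [List.getD_eq_getElem _ _ (by simpa using hj)]
        simp
      rw [hg]
      by_cases h1 : pvAt full j = ch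
      · simp [h1]
      · simp [h1]
    rw [hres]
    have := ih (S ++ [ch])
    simpa using this

-- ===== VERDICT (by name: the statement is the Claim_ definition above) =====
theorem enumerate_word_spec : Claim_equal_enumerate_word := by
  intro word _
  unfold Spec_enumerate_word enumerate_word enumerate_word_alt
  rw [pvA_gold word.toList [] PySem.Dict.empty [] pvInv_empty]
  simp only [List.nil_append]
  have hinit : List.replicate word.toList.length "" =
      (List.range word.toList.length).map (fun j =>
        if pvAt word.toList j ∈ ([] : List Char) then pvTgt word.toList j else "") := by
    simp
  rw [hinit, pvOuter word.toList (PySem.List.dedup word.toList) []]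
  apply List.ext_getElem
  · simp [pvGold_length]
  · intro j h1 h2
    have hj : j < word.toList.length := by simpa using h2
    have hmem : pvAt word.toList j ∈ PySem.List.dedup word.toList := by
      rw [PySem.List.mem_dedup]
      unfold pvAt
      rw [List.getD_eq_getElem _ _ hj]
      exact List.getElem_mem hj
    have hL : (pvGold [] word.toList)[j] = (pvGold [] word.toList).getD j "" :=
      (List.getD_eq_getElem _ _ h1).symm
    rw [hL, pvGold_getD word.toList [] j hj]
    simp only [List.getElem_map, List.getElem_range, List.nil_append, pvTgt, pvAt]
    have hmem' : word.toList.getD j ' ' ∈ PySem.List.dedup word.toList := hmem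
    rw [if_pos hmem']
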